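-- pv_equiv track=rewrite | github.com/lucifer1198/Codesignal | solutions/python/2017/digitalSumSort.py | digitalSumSort
-- ===== SOURCE A (Python) =====
-- def digitalSumSort(a):
--
--     def sumDigit(n):
--         dValue = 0
--         while n > 0:
--             dValue += n % 10
--             n //= 10
--         return dValue
--
--     bucks = dict()
--     for i in range(len(a)):
--         dValue = sumDigit(a[i])
--         if dValue not in bucks:
--             bucks[dValue] = []
--         bucks[dValue].append(a[i])
--
--     b = []
--     for dValue in sorted(bucks):
--         bucket = bucks[dValue]
--         bucket.sort()
--         for i in range(len(bucket)):
--             b.append(bucket[i])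
--
--     return b
-- ===== SOURCE B (Python) =====
-- def digitalSumSort(a):
--
--     def sumDigit(n):
--         dValue = 0
--         while n > 0:
--             dValue += n % 10
--             n //= 10
--         return dValue
--
--     return sorted(a, key=lambda x: (sumDigit(x), x))
-- ===== Notes on version B (the rewrite author's own statement) =====
-- stated objective: simpler
-- what changed: Replaces the bucket-dictionary grouping (one list per digit sum, per-bucket in-place sort, concatenation over sorted keys) by a single sort of the whole list with the composite key (sumDigit(x), x); the unchanged inner sumDigit loop keeps the 0-for-nonpositive behaviour.
import Mathlib
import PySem

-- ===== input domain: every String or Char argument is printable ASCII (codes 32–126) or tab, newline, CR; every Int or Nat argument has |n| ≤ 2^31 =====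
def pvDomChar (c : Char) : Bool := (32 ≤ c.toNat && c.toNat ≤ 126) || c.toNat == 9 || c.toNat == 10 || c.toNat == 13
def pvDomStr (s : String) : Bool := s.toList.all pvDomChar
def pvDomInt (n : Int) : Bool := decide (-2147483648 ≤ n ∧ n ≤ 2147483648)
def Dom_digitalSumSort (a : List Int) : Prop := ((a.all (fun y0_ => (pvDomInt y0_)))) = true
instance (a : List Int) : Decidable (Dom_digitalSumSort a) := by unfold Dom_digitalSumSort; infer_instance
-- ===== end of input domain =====

-- B replaces A's bucket-dictionary grouping (bucket per digit sum, per-bucket sort,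
-- concatenation over sorted keys) by a single sort with the composite key (sumDigit x, x);
-- objective: simpler.

-- ===== PORT A =====
-- shared helper: the nested sumDigit (identical code in A and B)
def sumDigitLoop (n dValue : Int) : Int :=
  if 0 < n then sumDigitLoop (PySem.Int.floordiv n 10) (dValue + PySem.Int.mod n 10)
  else dValue
termination_by n.toNat
decreasing_by
  rw [PySem.Int.floordiv_eq_ediv_of_pos (by norm_num)]
  omega

def sumDigit (n : Int) : Int := sumDigitLoop n 0

def digitalSumSort (a : List Int) : List Int :=
  let bucks := a.foldl
    (fun bucks x =>
      let dValue := sumDigit x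
      let bucks := if bucks.contains dValue then bucks else bucks.insert dValue []
      bucks.modify dValue [] (fun l => l ++ [x]))
    PySem.Dict.empty
  (PySem.List.sorted bucks.keys (fun k => k) false).foldl
    (fun b dValue =>
      let bucket := PySem.List.sorted (bucks.getD dValue []) (fun x => x) false
      b ++ bucket) []

-- ===== PORT B =====
def digitalSumSort_alt (a : List Int) : List Int :=
  PySem.List.sorted2 a (fun x => sumDigit x) (fun x => x) false

-- ===== PRECONDITION & SPEC =====
def Spec_digitalSumSort (a : List Int) (out : List Int) : Prop := out = digitalSumSort_alt a
instance (a : List Int) (out : List Int) : Decidable (Spec_digitalSumSort a out) := by unfold Spec_digitalSumSort; infer_instance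

-- ===== CLAIM (what is proved, stated in full; the proofs are below) =====
def Claim_equal_digitalSumSort : Prop := ∀ (a : List Int), Dom_digitalSumSort a → Spec_digitalSumSort a (digitalSumSort a)

-- ===== LEMMAS AND PROOFS =====

-- the ordering both outputs are sorted by: digit sum first, then value
def dsLe (x y : Int) : Prop := sumDigit x < sumDigit y ∨ (sumDigit x = sumDigit y ∧ x ≤ y)

theorem dsLe_trans : ∀ {x y z : Int}, dsLe x y → dsLe y z → dsLe x z := by
  intro x y z h1 h2
  unfold dsLe at *
  rcases h1 with h1 | ⟨h1, h1'⟩ <;> rcases h2 with h2 | ⟨h2, h2'⟩ <;> omega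

theorem dsLe_antisymm : ∀ {x y : Int}, dsLe x y → dsLe y x → x = y := by
  intro x y h1 h2
  unfold dsLe at *
  omega

theorem pairwise_insertBy (before : Int → Int → Bool) (x : Int)
    (h1 : ∀ z, before x z = false → dsLe z x)
    (h2 : ∀ y, before x y = true → dsLe x y) :
    ∀ ys : List Int, ys.Pairwise dsLe → (PySem.List.insertBy before x ys).Pairwise dsLe := by
  intro ys
  induction ys with
  | nil => intro _; simp [PySem.List.insertBy]
  | cons y ys ih =>
    intro hp
    rw [List.pairwise_cons] at hp
    by_cases hb : before x y = true
    · simp only [PySem.List.insertBy, hb, if_true]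
      refine List.Pairwise.cons ?_ (List.Pairwise.cons hp.1 hp.2)
      intro z hz
      rcases List.mem_cons.mp hz with rfl | hz
      · exact h2 _ hb
      · exact dsLe_trans (h2 _ hb) (hp.1 _ hz)
    · simp only [PySem.List.insertBy, hb]
      refine List.Pairwise.cons ?_ (ih hp.2)
      intro z hz
      rcases (PySem.List.mem_insertBy before x z ys).mp hz with rfl | hz
      · exact h1 _ (by simpa using hb)
      · exact hp.1 _ hz

-- B's sort is pairwise dsLe
theorem pairwise_foldl_insertBy (before : Int → Int → Bool)
    (h1 : ∀ x z, before x z = false → dsLe z x)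
    (h2 : ∀ x y, before x y = true → dsLe x y) :
    ∀ (l acc : List Int), acc.Pairwise dsLe →
      (l.foldl (fun acc x => PySem.List.insertBy before x acc) acc).Pairwise dsLe := by
  intro l
  induction l with
  | nil => intro acc h; simpa using h
  | cons x xs ih =>
    intro acc h
    simp only [List.foldl_cons]
    exact ih _ (pairwise_insertBy before x (h1 x) (h2 x) acc h)

theorem pairwise_alt (a : List Int) : (digitalSumSort_alt a).Pairwise dsLe := by
  unfold digitalSumSort_alt PySem.List.sorted2
  simp only [Bool.false_eq_true, if_false]
  refine pairwise_foldl_insertBy _ ?_ ?_ a [] List.Pairwise.nil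
  · intro x z hz
    simp only [Bool.or_eq_false_iff, Bool.and_eq_false_iff, decide_eq_false_iff_not,
      Bool.not_eq_false', decide_eq_true_eq] at hz
    unfold dsLe
    rcases hz with ⟨hz1, hz2 | hz2⟩ <;> omega
  · intro x y hy
    simp only [Bool.or_eq_true, Bool.and_eq_true, decide_eq_true_eq,
      Bool.not_eq_true', decide_eq_false_iff_not] at hy
    unfold dsLe
    rcases hy with hy | ⟨hy1, hy2⟩ <;> omega

theorem alt_perm (a : List Int) : (digitalSumSort_alt a).Perm a :=
  PySem.List.sorted2_perm a _ _ false

-- ===== A-side lemmas =====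

-- proof-only abbreviation: the bucket dictionary built by A, in single-modify form
def buildD (a : List Int) : PySem.Dict Int (List Int) :=
  a.foldl (fun d x => d.modify (sumDigit x) [] (fun l => l ++ [x])) PySem.Dict.empty

theorem insert_insert_self (d : PySem.Dict Int (List Int)) (k : Int) (v w : List Int) :
    (d.insert k v).insert k w = d.insert k w := by
  obtain ⟨items⟩ := d
  by_cases hc : (PySem.Dict.mk items : PySem.Dict Int (List Int)).contains k = true
  · unfold PySem.Dict.insert
    rw [if_pos hc]
    have hc2 : (PySem.Dict.mk (items.map (fun p => if (p.1 == k) = true then ((k, v) : Int × List Int) else p)) : PySem.Dict Int (List Int)).contains k = true := by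
      simp only [PySem.Dict.contains_mk, List.any_map] at hc ⊢
      convert hc using 2
      funext p
      by_cases h : (p.1 == k) = true <;> simp [h, Function.comp]
    rw [if_pos hc2, if_pos hc]
    congr 1
    rw [List.map_map]
    apply List.map_congr_left
    intro p _
    by_cases h : (p.1 == k) = true <;> simp [h, Function.comp]
  · unfold PySem.Dict.insert
    rw [if_neg hc]
    have hc2 : (PySem.Dict.mk (items ++ [(k, v)]) : PySem.Dict Int (List Int)).contains k = true := by
      simp [PySem.Dict.contains_mk]
    rw [if_pos hc2, if_neg hc]
    congr 1
    have hall : ∀ p ∈ items, ((p : Int × List Int).1 == k) = false := by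
      simp only [PySem.Dict.contains_mk, Bool.not_eq_true, List.any_eq_false] at hc
      intro p hp
      simpa using hc p hp
    rw [List.map_append]
    congr 1
    · conv_rhs => rw [← List.map_id items]
      apply List.map_congr_left
      intro p hp
      simp [hall p hp]
    · simp

theorem stepA_eq (d : PySem.Dict Int (List Int)) (x : Int) :
    (if d.contains (sumDigit x) then d else d.insert (sumDigit x) []).modify (sumDigit x) [] (fun l => l ++ [x])
      = d.modify (sumDigit x) [] (fun l => l ++ [x]) := by
  by_cases h : d.contains (sumDigit x) = true
  · rw [if_pos h]
  · rw [if_neg h]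
    unfold PySem.Dict.modify
    rw [PySem.Dict.getD_insert_self, insert_insert_self,
      PySem.Dict.getD_of_not_contains d [] (by simpa using h)]

theorem getD_buildD (a : List Int) (k : Int) :
    (buildD a).getD k [] = a.filter (fun x => sumDigit x == k) := by
  unfold buildD
  have h : a.foldl (fun d x => d.modify (sumDigit x) [] (fun l => l ++ [x])) PySem.Dict.empty
      = (a.map (fun x => (sumDigit x, x))).foldl (fun d p => d.modify p.1 [] (fun l => l ++ [p.2])) PySem.Dict.empty := by
    rw [List.foldl_map]
  rw [h, PySem.Dict.getD_foldl_modify_append]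
  have hempty : (PySem.Dict.empty : PySem.Dict Int (List Int)).getD k [] = [] := by
    apply PySem.Dict.getD_of_not_contains
    simp [PySem.Dict.empty, PySem.Dict.contains_mk]
  rw [hempty, List.nil_append, List.filter_map]
  rw [show ((fun p : Int × Int => p.1 == k) ∘ fun x : Int => (sumDigit x, x)) = (fun x : Int => sumDigit x == k) from rfl]
  rw [List.map_map, show ((fun x : Int × Int => x.2) ∘ fun x : Int => (sumDigit x, x)) = id from rfl, List.map_id]

theorem nodup_keys_buildD (a : List Int) : (buildD a).keys.Nodup := by
  unfold buildD
  exact PySem.Dict.nodup_keys_foldl_modify_key a sumDigit [] (fun _ x l => l ++ [x])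
    PySem.Dict.empty (by simp [PySem.Dict.keys_empty])

theorem mem_keys_foldl_mono (a : List Int) :
    ∀ (d : PySem.Dict Int (List Int)) (k : Int), k ∈ d.keys →
      k ∈ (a.foldl (fun d x => d.modify (sumDigit x) [] (fun l => l ++ [x])) d).keys := by
  induction a with
  | nil => intro d k hk; simpa using hk
  | cons x xs ih =>
    intro d k hk
    simp only [List.foldl_cons]
    apply ih
    rw [PySem.Dict.keys_modify]
    simp only [PySem.Dict.mem_keys_insert._simp_1]
    exact Or.inr hk

theorem mem_keys_buildD (a : List Int) :
    ∀ x ∈ a, sumDigit x ∈ (buildD a).keys := by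
  unfold buildD
  generalize PySem.Dict.empty = d
  induction a generalizing d with
  | nil => intro x hx; simp at hx
  | cons y ys ih =>
    intro x hx
    simp only [List.foldl_cons]
    rcases List.mem_cons.mp hx with rfl | hx
    · apply mem_keys_foldl_mono
      rw [PySem.Dict.keys_modify]
      simp [PySem.Dict.mem_keys_insert._simp_1]
    · exact ih _ x hx

theorem flatMap_buckets_perm :
    ∀ (ks a : List Int), ks.Nodup → (∀ x ∈ a, sumDigit x ∈ ks) →
      (ks.flatMap fun k =>
        PySem.List.sorted (a.filter (fun x => sumDigit x == k)) (fun x => x) false).Perm a := by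
  intro ks
  induction ks with
  | nil =>
    intro a _ hcov
    have : a = [] := by
      cases a with
      | nil => rfl
      | cons y t => exact absurd (hcov y (List.mem_cons_self)) (List.not_mem_nil)
    simp [this]
  | cons k ks ih =>
    intro a hnd hcov
    rw [List.flatMap_cons]
    have hk_not : k ∉ ks := (List.nodup_cons.mp hnd).1
    have htail :
        (ks.flatMap fun k' =>
          PySem.List.sorted (a.filter (fun x => sumDigit x == k')) (fun x => x) false)
        = (ks.flatMap fun k' =>
          PySem.List.sorted ((a.filter (fun x => !(sumDigit x == k))).filter (fun x => sumDigit x == k')) (fun x => x) false) := by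
      rw [List.flatMap_def, List.flatMap_def]
      congr 1
      apply List.map_congr_left
      intro k' hk'
      congr 1
      rw [List.filter_filter]
      apply List.filter_congr
      intro x _
      by_cases h : sumDigit x = k'
      · have hkne : k' ≠ k := fun hkk => hk_not (hkk ▸ hk')
        have hne : (sumDigit x == k) = false := by
          simp only [beq_eq_false_iff_ne, ne_eq]
          omega
        simp [h]
        exact hkne
      · have hf : (sumDigit x == k') = false := by
          simp only [beq_eq_false_iff_ne, ne_eq]
          omega
        rw [hf]
        rfl
    rw [htail]
    have hcov' : ∀ x ∈ a.filter (fun x => !(sumDigit x == k)), sumDigit x ∈ ks := by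
      intro x hx
      rw [List.mem_filter] at hx
      rcases List.mem_cons.mp (hcov x hx.1) with h | h
      · exact absurd h (by simpa using hx.2)
      · exact h
    have hperm := (PySem.List.sorted_perm (a.filter (fun x => sumDigit x == k)) (fun x => x) false).append
      (ih _ (List.nodup_cons.mp hnd).2 hcov')
    exact hperm.trans (List.filter_append_perm _ a)

theorem pairwise_A_out (ks a : List Int) (hks : ks.Pairwise (· < ·)) :
    (ks.flatMap fun k =>
      PySem.List.sorted (a.filter (fun x => sumDigit x == k)) (fun x => x) false).Pairwise dsLe := by
  rw [List.flatMap_def]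
  rw [List.pairwise_flatten]
  constructor
  · intro l hl
    rw [List.mem_map] at hl
    obtain ⟨k, _, rfl⟩ := hl
    have hmem : ∀ x ∈ PySem.List.sorted (a.filter (fun x => sumDigit x == k)) (fun x => x) false,
        sumDigit x = k := by
      intro x hx
      rw [PySem.List.mem_sorted, List.mem_filter] at hx
      simpa using hx.2
    refine List.Pairwise.imp_of_mem ?_ (PySem.List.sorted_pairwise (a.filter (fun x => sumDigit x == k)) (fun x => x))
    intro x y hx hy hxy
    exact Or.inr ⟨(hmem x hx).trans (hmem y hy).symm, hxy⟩
  · rw [List.pairwise_map]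
    refine hks.imp_of_mem ?_
    intro k1 k2 _ _ hlt x hx y hy
    rw [PySem.List.mem_sorted, List.mem_filter] at hx hy
    have h1 : sumDigit x = k1 := by simpa using hx.2
    have h2 : sumDigit y = k2 := by simpa using hy.2
    exact Or.inl (by omega)

theorem A_eq_flatMap (a : List Int) :
    digitalSumSort a =
      (PySem.List.sorted (buildD a).keys (fun k => k) false).flatMap
        (fun k => PySem.List.sorted (a.filter (fun x => sumDigit x == k)) (fun x => x) false) := by
  unfold digitalSumSort
  have hstep : (fun (bucks : PySem.Dict Int (List Int)) (x : Int) =>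
      let dValue := sumDigit x
      let bucks := if bucks.contains dValue then bucks else bucks.insert dValue []
      bucks.modify dValue [] (fun l => l ++ [x]))
      = fun d x => d.modify (sumDigit x) [] (fun l => l ++ [x]) := by
    funext d x
    exact stepA_eq d x
  rw [hstep]
  have hb : List.foldl (fun d x => d.modify (sumDigit x) [] (fun l => l ++ [x])) PySem.Dict.empty a = buildD a := rfl
  rw [hb, PySem.List.foldl_append_eq_flatMap, List.nil_append]
  rw [List.flatMap_def, List.flatMap_def]
  congr 1
  apply List.map_congr_left
  intro k _
  rw [getD_buildD]

-- ===== VERDICT (by name: the statement is the Claim_ definition above) =====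
theorem digitalSumSort_spec : Claim_equal_digitalSumSort := by
  intro a _
  unfold Spec_digitalSumSort
  rw [A_eq_flatMap]
  set Ks := PySem.List.sorted (buildD a).keys (fun k => k) false with hKs
  have hKnd : Ks.Nodup :=
    ((PySem.List.sorted_perm (buildD a).keys (fun k => k) false).symm).nodup (nodup_keys_buildD a)
  have hKlt : Ks.Pairwise (· < ·) := by
    have hle : Ks.Pairwise (fun a b => a ≤ b) := PySem.List.sorted_pairwise (buildD a).keys (fun k => k)
    exact (hle.and hKnd).imp (fun h => lt_of_le_of_ne h.1 h.2)
  have hcov : ∀ x ∈ a, sumDigit x ∈ Ks := fun x hx =>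
    (PySem.List.mem_sorted (buildD a).keys (fun k => k) false (sumDigit x)).mpr (mem_keys_buildD a x hx)
  exact List.Perm.eq_of_pairwise
    (fun x y _ _ h1 h2 => dsLe_antisymm h1 h2)
    (pairwise_A_out Ks a hKlt)
    (pairwise_alt a)
    ((flatMap_buckets_perm Ks a hKnd hcov).trans (alt_perm a).symm)
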